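-- pv_equiv track=rewrite | github.com/danthus/VideoCompression-Python | util.py | create_reverse_diagonal_idx
-- ===== SOURCE A (Python) =====
-- def create_reverse_diagonal_idx(I):
--     y_idx = tuple()
--     x_idx = tuple()
--
--     for i in range(1, I+1, 1):
--         y_idx += tuple(idx for idx in range(i))
--     for i in range(-I+1, 0, 1):
--         y_idx += y_idx[i:]
--
--     for i in range(I):
--         x_idx += tuple(idx for idx in range(i, -1, -1))
--     for i in range(-I, -1, 1):
--         x_idx += x_idx[i:-1]
--
--     return x_idx, y_idx
-- ===== SOURCE B (Python) =====
-- def create_reverse_diagonal_idx(I):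
--     # One pass over the anti-diagonals, appending each index to a list: O(I^2).
--     x_idx = []
--     y_idx = []
--     for d in range(2*I - 1):
--         lo = max(0, d - I + 1)
--         for x in range(min(d, I - 1), lo - 1, -1):
--             x_idx.append(x)
--             y_idx.append(d - x)
--     return tuple(x_idx), tuple(y_idx)
-- ===== Notes on version B (the rewrite author's own statement) =====
-- stated objective: faster
-- what changed: B emits each (x,y) index pair directly in one pass over the anti-diagonals, appending to two lists, instead of A's repeated whole-tuple concatenations and self-slices that copy the growing tuples over and over.
import Mathlib
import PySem

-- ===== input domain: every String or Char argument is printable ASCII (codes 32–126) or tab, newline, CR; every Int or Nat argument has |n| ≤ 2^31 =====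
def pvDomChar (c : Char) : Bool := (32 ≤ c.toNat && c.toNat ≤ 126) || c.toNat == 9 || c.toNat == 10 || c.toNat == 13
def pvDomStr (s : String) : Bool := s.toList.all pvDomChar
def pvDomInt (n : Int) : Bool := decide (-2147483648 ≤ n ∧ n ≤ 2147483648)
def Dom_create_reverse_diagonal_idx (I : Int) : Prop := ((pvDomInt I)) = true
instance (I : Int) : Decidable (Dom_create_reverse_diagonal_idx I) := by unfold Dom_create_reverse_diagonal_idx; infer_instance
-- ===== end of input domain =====

-- B builds the zigzag index lists in a single pass over the anti-diagonals,
-- appending per element, instead of A's repeated whole-tuple copies and self-slices (objective: faster).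

-- ===== PORT A =====
def create_reverse_diagonal_idx (I : Int) : List Int × List Int :=
  let y1 := (PySem.List.pyRange 1 (I+1) 1).foldl
    (fun acc i => acc ++ PySem.List.pyRange 0 i 1) ([] : List Int)
  let y2 := (PySem.List.pyRange (-I+1) 0 1).foldl
    (fun acc i => acc ++ PySem.List.slice acc (some i) none) y1
  let x1 := (PySem.List.pyRange 0 I 1).foldl
    (fun acc i => acc ++ PySem.List.pyRange i (-1) (-1)) ([] : List Int)
  let x2 := (PySem.List.pyRange (-I) (-1) 1).foldl
    (fun acc i => acc ++ PySem.List.slice acc (some i) (some (-1))) x1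
  (x2, y2)

-- ===== PORT B =====
def create_reverse_diagonal_idx_alt (I : Int) : List Int × List Int :=
  (PySem.List.pyRange 0 (2*I - 1) 1).foldl
    (fun st d =>
      (PySem.List.pyRange (min d (I-1)) (max 0 (d - I + 1) - 1) (-1)).foldl
        (fun st x => (st.1 ++ [x], st.2 ++ [d - x])) st)
    ([], [])

-- ===== PRECONDITION & SPEC =====
def Spec_create_reverse_diagonal_idx (I : Int) (out : List Int × List Int) : Prop := out = create_reverse_diagonal_idx_alt I
instance (I : Int) (out : List Int × List Int) : Decidable (Spec_create_reverse_diagonal_idx I out) := by unfold Spec_create_reverse_diagonal_idx; infer_instance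

-- ===== CLAIM (what is proved, stated in full; the proofs are below) =====
def Claim_equal_create_reverse_diagonal_idx : Prop := ∀ (I : Int), Dom_create_reverse_diagonal_idx I → Spec_create_reverse_diagonal_idx I (create_reverse_diagonal_idx I)

-- ===== LEMMAS AND PROOFS =====

-- x indices of anti-diagonal d (as B enumerates them, descending)
def pvDiag (I d : Int) : List Int :=
  PySem.List.pyRange (min d (I-1)) (max 0 (d - I + 1) - 1) (-1)

-- y indices of anti-diagonal d
def pvYd (I d : Int) : List Int := (pvDiag I d).map (fun x => d - x)

-- the x / y lists accumulated over diagonals 0..m-1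
def pvXG (I m : Int) : List Int := (PySem.List.pyRange 0 m 1).flatMap (pvDiag I)
def pvYG (I m : Int) : List Int := (PySem.List.pyRange 0 m 1).flatMap (pvYd I)

theorem pvXG_succ (I m : Int) (h : 0 ≤ m) : pvXG I (m+1) = pvXG I m ++ pvDiag I m := by
  unfold pvXG
  rw [PySem.List.pyRange_one_succ_right h, List.flatMap_append]
  simp

theorem pvYG_succ (I m : Int) (h : 0 ≤ m) : pvYG I (m+1) = pvYG I m ++ pvYd I m := by
  unfold pvYG
  rw [PySem.List.pyRange_one_succ_right h, List.flatMap_append]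
  simp

-- c - (descending range) is an ascending range
theorem pv_map_sub_pyRange (c a b : Int) :
    (PySem.List.pyRange a b (-1)).map (fun x => c - x) = PySem.List.pyRange (c - a) (c - b) 1 := by
  rw [PySem.List.pyRange_neg_one, PySem.List.pyRange_one, List.map_map]
  have : (c - b) - (c - a) = a - b := by ring
  rw [this]
  apply List.map_congr_left
  intro k _
  simp only [Function.comp]
  ring

theorem pv_dropLast_pyRange_neg (a b : Int) :
    (PySem.List.pyRange a b (-1)).dropLast = PySem.List.pyRange a (b+1) (-1) := by
  rw [PySem.List.pyRange_neg_one_eq_reverse, PySem.List.pyRange_neg_one_eq_reverse,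
    List.dropLast_reverse]
  by_cases h : b + 1 < a + 1
  · rw [PySem.List.pyRange_one_cons h, List.tail_cons]
  · rw [PySem.List.pyRange_one_eq_nil (by omega), PySem.List.pyRange_one_eq_nil (by omega)]
    rfl

theorem pvDiag_small (I d : Int) (h : d < I) :
    pvDiag I d = PySem.List.pyRange d (-1) (-1) := by
  unfold pvDiag
  rw [min_eq_left (by omega), max_eq_left (by omega)]
  norm_num

theorem pvYd_small (I d : Int) (h : d < I) :
    pvYd I d = PySem.List.pyRange 0 (d+1) 1 := by
  unfold pvYd
  rw [pvDiag_small I d h, pv_map_sub_pyRange]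
  have h1 : d - d = 0 := by ring
  have h2 : d - -1 = d + 1 := by ring
  rw [h1, h2]

theorem pvDiag_big (I d : Int) (hd : I - 1 ≤ d) :
    pvDiag I d = PySem.List.pyRange (I-1) (d-I) (-1) := by
  unfold pvDiag
  rw [min_eq_right (by omega), max_eq_right (by omega)]
  congr 1
  ring

theorem pvYd_big (I d : Int) (hd : I - 1 ≤ d) :
    pvYd I d = PySem.List.pyRange (d-I+1) I 1 := by
  unfold pvYd
  rw [pvDiag_big I d hd, pv_map_sub_pyRange]
  have h2 : d - (I-1) = d - I + 1 := by ring
  have h3 : d - (d - I) = I := by ring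
  rw [h2, h3]

theorem pvDiag_dropLast (I d : Int) (hd : I - 1 ≤ d) :
    (pvDiag I d).dropLast = pvDiag I (d+1) := by
  rw [pvDiag_big I d hd, pvDiag_big I (d+1) (by omega), pv_dropLast_pyRange_neg]
  congr 1
  ring

theorem pvYd_drop (I d : Int) (hd : I - 1 ≤ d) (hd2 : d < 2*I - 1) :
    (pvYd I d).drop 1 = pvYd I (d+1) := by
  rw [pvYd_big I d hd, pvYd_big I (d+1) (by omega),
    PySem.List.pyRange_one_cons (by omega : d - I + 1 < I), List.drop_one, List.tail_cons]
  congr 1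
  ring

theorem pvYd_big_length (I d : Int) (hd : I - 1 ≤ d) :
    (pvYd I d).length = (2*I - 1 - d).toNat := by
  rw [pvYd_big I d hd, PySem.List.length_pyRange_one]
  congr 1
  ring

theorem pvDiag_big_length (I d : Int) (hd : I - 1 ≤ d) :
    (pvDiag I d).length = (2*I - 1 - d).toNat := by
  rw [pvDiag_big I d hd, PySem.List.length_pyRange_neg_one]
  congr 1
  ring

-- slices with a negative start
theorem pv_slice_neg_from (xs : List Int) (r : Nat) :
    PySem.List.slice xs (some (-((r:Int)+1))) none = xs.drop (xs.length - (r+1)) := by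
  have e : (-((r:Int)+1)) = -(((r+1:Nat)):Int) := by push_cast; ring
  rw [e, PySem.List.slice_from_neg_natCast _ _ (by omega)]

theorem pv_slice_neg_to_neg_one (xs : List Int) (r : Nat) (h : r + 2 ≤ xs.length) :
    PySem.List.slice xs (some (-((r:Int)+2))) (some (-1)) =
      (xs.drop (xs.length - (r+2))).take (r+1) := by
  have e : (-((r:Int)+2)) = -(((r+2:Nat)):Int) := by push_cast; ring
  rw [e]
  simp only [PySem.List.slice, PySem.List.clampIdx_neg_natCast _ _ (by omega : 0 < r+2),
    PySem.List.clampIdx_neg_one]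
  congr 1
  omega

-- A's second y-loop: appending self-slices walks the lower diagonals
theorem pv_yloop (I : Int) : ∀ (r k : Nat), (k:Int) + (r:Int) = I - 1 →
    (PySem.List.pyRange (-(r:Int)) 0 1).foldl
      (fun acc i => acc ++ PySem.List.slice acc (some i) none) (pvYG I (I + k)) =
    pvYG I (2*I - 1) := by
  intro r
  induction r with
  | zero =>
    intro k hk
    rw [PySem.List.pyRange_one_eq_nil (by omega), List.foldl_nil,
      (show I + (k:Int) = 2*I - 1 by omega)]
  | succ r ih =>
    intro k hk
    push_cast at hk
    have hcons : PySem.List.pyRange (-((r+1:Nat):Int)) 0 1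
        = (-((r:Int)+1)) :: PySem.List.pyRange (-(r:Int)) 0 1 := by
      push_cast
      rw [PySem.List.pyRange_one_cons (by omega : -((r:Int)+1) < 0)]
      congr 2
      ring
    rw [hcons, List.foldl_cons]
    have hY : pvYG I (I + (k:Int)) = pvYG I (I + (k:Int) - 1) ++ pvYd I (I + (k:Int) - 1) := by
      have h := pvYG_succ I (I + (k:Int) - 1) (by omega)
      rw [(show I + (k:Int) - 1 + 1 = I + (k:Int) by ring)] at h
      exact h
    have hlen : (pvYd I (I + (k:Int) - 1)).length = r + 2 := by
      rw [pvYd_big_length I _ (by omega)]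
      omega
    rw [pv_slice_neg_from, hY, List.length_append, hlen,
      (show (pvYG I (I + (k:Int) - 1)).length + (r + 2) - (r + 1)
          = (pvYG I (I + (k:Int) - 1)).length + 1 by omega),
      List.drop_length_add_append,
      pvYd_drop I (I + (k:Int) - 1) (by omega) (by omega),
      (show I + (k:Int) - 1 + 1 = I + (k:Int) by ring), ← hY,
      ← pvYG_succ I (I + (k:Int)) (by omega)]
    have h := ih (k+1) (by push_cast; omega)
    push_cast at h
    rw [(show I + ((k:Int) + 1) = I + (k:Int) + 1 by ring)] at h
    exact h

-- A's second x-loop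
theorem pv_xloop (I : Int) : ∀ (r k : Nat), (k:Int) + (r:Int) = I - 1 →
    (PySem.List.pyRange (-(r:Int) - 1) (-1) 1).foldl
      (fun acc i => acc ++ PySem.List.slice acc (some i) (some (-1))) (pvXG I (I + k)) =
    pvXG I (2*I - 1) := by
  intro r
  induction r with
  | zero =>
    intro k hk
    rw [PySem.List.pyRange_one_eq_nil (by omega), List.foldl_nil,
      (show I + (k:Int) = 2*I - 1 by omega)]
  | succ r ih =>
    intro k hk
    push_cast at hk
    have hcons : PySem.List.pyRange (-((r+1:Nat):Int) - 1) (-1) 1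
        = (-((r:Int)+2)) :: PySem.List.pyRange (-(r:Int) - 1) (-1) 1 := by
      push_cast
      rw [(show -((r:Int)+1) - 1 = -((r:Int)+2) by ring),
        PySem.List.pyRange_one_cons (by omega : -((r:Int)+2) < -1)]
      congr 2
      ring
    rw [hcons, List.foldl_cons]
    have hX : pvXG I (I + (k:Int)) = pvXG I (I + (k:Int) - 1) ++ pvDiag I (I + (k:Int) - 1) := by
      have h := pvXG_succ I (I + (k:Int) - 1) (by omega)
      rw [(show I + (k:Int) - 1 + 1 = I + (k:Int) by ring)] at h
      exact h
    have hlen : (pvDiag I (I + (k:Int) - 1)).length = r + 2 := by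
      rw [pvDiag_big_length I _ (by omega)]
      omega
    rw [hX, pv_slice_neg_to_neg_one _ r (by rw [List.length_append, hlen]; omega),
      List.length_append, hlen,
      (show (pvXG I (I + (k:Int) - 1)).length + (r + 2) - (r + 2)
          = (pvXG I (I + (k:Int) - 1)).length by omega),
      List.drop_left,
      (show r + 1 = (r + 2) - 1 by omega), ← hlen, ← List.dropLast_eq_take,
      pvDiag_dropLast I (I + (k:Int) - 1) (by omega),
      (show I + (k:Int) - 1 + 1 = I + (k:Int) by ring), ← hX,
      ← pvXG_succ I (I + (k:Int)) (by omega)]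
    have h := ih (k+1) (by push_cast; omega)
    push_cast at h
    rw [(show I + ((k:Int) + 1) = I + (k:Int) + 1 by ring)] at h
    exact h

-- A's first y-loop builds the upper diagonals
theorem pv_y1 (I : Int) (h1 : 1 ≤ I) :
    (PySem.List.pyRange 1 (I+1) 1).foldl
      (fun acc i => acc ++ PySem.List.pyRange 0 i 1) ([] : List Int) = pvYG I I := by
  rw [PySem.List.foldl_append_eq_flatMap, List.nil_append]
  unfold pvYG
  rw [PySem.List.pyRange_one 1 (I+1), PySem.List.pyRange_one 0 I,
    (show I + 1 - 1 = I by ring), (show I - 0 = I by ring),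
    List.flatMap_map, List.flatMap_map]
  apply List.flatMap_congr
  intro k hk
  rw [List.mem_range] at hk
  have hkI : (k:Int) < I := by omega
  rw [pvYd_small I (0 + (k:Int)) (by omega)]
  congr 1
  ring

theorem pv_x1 (I : Int) :
    (PySem.List.pyRange 0 I 1).foldl
      (fun acc i => acc ++ PySem.List.pyRange i (-1) (-1)) ([] : List Int) = pvXG I I := by
  have hstep : ∀ (acc : List Int), ∀ i ∈ PySem.List.pyRange 0 I 1,
      acc ++ PySem.List.pyRange i (-1) (-1) = acc ++ pvDiag I i := by
    intro acc i hi
    rw [PySem.List.mem_pyRange_one] at hi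
    rw [pvDiag_small I i hi.2]
  rw [PySem.List.foldl_congr_mem _ _ _ _ hstep, PySem.List.foldl_append_eq_flatMap,
    List.nil_append]
  rfl

theorem pv_B_eq (I : Int) :
    create_reverse_diagonal_idx_alt I = (pvXG I (2*I - 1), pvYG I (2*I - 1)) := by
  unfold create_reverse_diagonal_idx_alt
  have hstep : ∀ (st : List Int × List Int) (d : Int),
      (PySem.List.pyRange (min d (I-1)) (max 0 (d - I + 1) - 1) (-1)).foldl
        (fun st x => (st.1 ++ [x], st.2 ++ [d - x])) st
      = (st.1 ++ pvDiag I d, st.2 ++ pvYd I d) := by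
    intro st d
    obtain ⟨a, b⟩ := st
    rw [PySem.List.foldl_prod_mk (f := fun a x => a ++ [x]) (g := fun b x => b ++ [d - x]),
      PySem.List.foldl_append_singleton_eq_self, PySem.List.foldl_append_singleton_eq_map]
    rfl
  rw [PySem.List.foldl_congr_mem _ _ (fun st d => (st.1 ++ pvDiag I d, st.2 ++ pvYd I d)) _
    (fun st d _ => hstep st d)]
  rw [PySem.List.foldl_prod_mk (f := fun a d => a ++ pvDiag I d) (g := fun b d => b ++ pvYd I d),
    PySem.List.foldl_append_eq_flatMap, PySem.List.foldl_append_eq_flatMap]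
  rfl

-- ===== VERDICT (by name: the statement is the Claim_ definition above) =====
theorem create_reverse_diagonal_idx_spec : Claim_equal_create_reverse_diagonal_idx := by
  intro I _
  unfold Spec_create_reverse_diagonal_idx create_reverse_diagonal_idx
  rw [pv_B_eq]
  by_cases h1 : 1 ≤ I
  · rw [pv_y1 I h1, pv_x1 I]
    have hr : ((I-1).toNat : Int) = I - 1 := by omega
    have hy := pv_yloop I (I-1).toNat 0 (by omega)
    have hx := pv_xloop I (I-1).toNat 0 (by omega)
    rw [hr] at hy hx
    simp only [Nat.cast_zero, add_zero] at hy hx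
    rw [(show -(I-1) = -I + 1 by ring)] at hy
    rw [(show -(I-1) - 1 = -I by ring)] at hx
    simp only [hy, hx]
  · rw [PySem.List.pyRange_one_eq_nil (by omega : I + 1 ≤ 1),
      PySem.List.pyRange_one_eq_nil (by omega : (0:Int) ≤ -I + 1),
      PySem.List.pyRange_one_eq_nil (by omega : I ≤ 0),
      PySem.List.pyRange_one_eq_nil (by omega : (-1:Int) ≤ -I)]
    unfold pvXG pvYG
    rw [PySem.List.pyRange_one_eq_nil (by omega : 2*I - 1 ≤ 0)]
    rfl
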